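-- pv_equiv track=rewrite | github.com/31788517-ctyqq/sport-lottery-sweeper | backend/core/security.py | get_issues
-- ===== SOURCE A (Python) =====
-- def get_issues(password: str) -> list:
--     """获取密码问题列表"""
--     issues = []
--
--     if len(password) < 8:
--         issues.append("密码长度至少8位")
--     if not any(c.islower() for c in password):
--         issues.append("密码必须包含小写字母")
--     if not any(c.isupper() for c in password):
--         issues.append("密码必须包含大写字母")
--     if not any(c.isdigit() for c in password):
--         issues.append("密码必须包含数字")
--     if not any(c in "!@#$%^&*()_+-=[]{}|;:,.<>?" for c in password):
--         issues.append("密码必须包含特殊字符")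
--
--     return issues
-- ===== SOURCE B (Python) =====
-- def get_issues(password: str) -> list:
--     """Single-pass: maintain four flags in one traversal instead of five scans."""
--     has_lower = has_upper = has_digit = has_special = False
--     for c in password:
--         if c.islower():
--             has_lower = True
--         if c.isupper():
--             has_upper = True
--         if c.isdigit():
--             has_digit = True
--         if c in "!@#$%^&*()_+-=[]{}|;:,.<>?":
--             has_special = True
--     issues = []
--     if len(password) < 8:
--         issues.append("密码长度至少8位")
--     if not has_lower:
--         issues.append("密码必须包含小写字母")
--     if not has_upper:
--         issues.append("密码必须包含大写字母")
--     if not has_digit: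
--         issues.append("密码必须包含数字")
--     if not has_special:
--         issues.append("密码必须包含特殊字符")
--     return issues
-- ===== Notes on version B (the rewrite author's own statement) =====
-- stated objective: alternative
-- what changed: Replaces A's five separate scans of the password (length check plus four any(...) generator passes) with one state-maintaining loop that updates four booleans in a single traversal, then builds the issue list from the flags.
import Mathlib
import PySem

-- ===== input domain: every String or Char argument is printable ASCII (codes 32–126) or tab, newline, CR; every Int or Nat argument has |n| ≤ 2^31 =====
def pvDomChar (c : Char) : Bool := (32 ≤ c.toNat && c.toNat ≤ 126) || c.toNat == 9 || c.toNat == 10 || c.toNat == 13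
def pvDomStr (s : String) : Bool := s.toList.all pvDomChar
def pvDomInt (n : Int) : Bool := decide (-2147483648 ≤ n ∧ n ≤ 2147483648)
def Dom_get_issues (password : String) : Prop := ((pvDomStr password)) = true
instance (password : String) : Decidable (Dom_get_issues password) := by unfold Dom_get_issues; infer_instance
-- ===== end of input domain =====

-- B replaces A's five separate any()-scans with one single-pass loop maintaining four flags (objective: alternative decomposition).

-- the special-character string, shared verbatim by both Python versions
def pvSpecials : List Char := "!@#$%^&*()_+-=[]{}|;:,.<>?".toList

-- ===== PORT A =====
def get_issues (password : String) : List String :=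
  let issues : List String := []
  let issues := if PySem.Str.len password < 8 then issues ++ ["密码长度至少8位"] else issues
  let issues := if !(password.toList.any (fun c => PySem.Chars.islower c)) then issues ++ ["密码必须包含小写字母"] else issues
  let issues := if !(password.toList.any (fun c => PySem.Chars.isupper c)) then issues ++ ["密码必须包含大写字母"] else issues
  let issues := if !(password.toList.any (fun c => PySem.Chars.isdigit c)) then issues ++ ["密码必须包含数字"] else issues
  let issues := if !(password.toList.any (fun c => pvSpecials.contains c)) then issues ++ ["密码必须包含特殊字符"] else issues
  issues

-- ===== PORT B =====
-- one fold over the characters, carrying the four flags as state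
def get_issues_alt (password : String) : List String :=
  let flags := password.toList.foldl
    (fun (st : Bool × Bool × Bool × Bool) c =>
      let st := if PySem.Chars.islower c then (true, st.2.1, st.2.2.1, st.2.2.2) else st
      let st := if PySem.Chars.isupper c then (st.1, true, st.2.2.1, st.2.2.2) else st
      let st := if PySem.Chars.isdigit c then (st.1, st.2.1, true, st.2.2.2) else st
      let st := if pvSpecials.contains c then (st.1, st.2.1, st.2.2.1, true) else st
      st)
    (false, false, false, false)
  let issues : List String := []
  let issues := if PySem.Str.len password < 8 then issues ++ ["密码长度至少8位"] else issues
  let issues := if !flags.1 then issues ++ ["密码必须包含小写字母"] else issues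
  let issues := if !flags.2.1 then issues ++ ["密码必须包含大写字母"] else issues
  let issues := if !flags.2.2.1 then issues ++ ["密码必须包含数字"] else issues
  let issues := if !flags.2.2.2 then issues ++ ["密码必须包含特殊字符"] else issues
  issues

-- ===== PRECONDITION & SPEC =====
def Spec_get_issues (password : String) (out : List String) : Prop := out = get_issues_alt password
instance (password : String) (out : List String) : Decidable (Spec_get_issues password out) := by unfold Spec_get_issues; infer_instance

-- ===== CLAIM (what is proved, stated in full; the proofs are below) =====
def Claim_equal_get_issues : Prop := ∀ (password : String), Dom_get_issues password → Spec_get_issues password (get_issues password)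

-- ===== LEMMAS AND PROOFS =====

-- the single fold computes the four 'any' scans at once
theorem pv_fold_flags (l : List Char) (s : Bool × Bool × Bool × Bool) :
    l.foldl
      (fun (st : Bool × Bool × Bool × Bool) c =>
        let st := if PySem.Chars.islower c then (true, st.2.1, st.2.2.1, st.2.2.2) else st
        let st := if PySem.Chars.isupper c then (st.1, true, st.2.2.1, st.2.2.2) else st
        let st := if PySem.Chars.isdigit c then (st.1, st.2.1, true, st.2.2.2) else st
        let st := if pvSpecials.contains c then (st.1, st.2.1, st.2.2.1, true) else st
        st) s
    = (s.1 || l.any (fun c => PySem.Chars.islower c),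
       s.2.1 || l.any (fun c => PySem.Chars.isupper c),
       s.2.2.1 || l.any (fun c => PySem.Chars.isdigit c),
       s.2.2.2 || l.any (fun c => pvSpecials.contains c)) := by
  induction l generalizing s with
  | nil => simp
  | cons c l ih =>
    simp only [List.foldl_cons, List.any_cons, ih]
    obtain ⟨a, b, d, e⟩ := s
    by_cases h1 : PySem.Chars.islower c <;>
    by_cases h2 : PySem.Chars.isupper c <;>
    by_cases h3 : PySem.Chars.isdigit c <;>
    by_cases h4 : c ∈ pvSpecials <;>
    simp [h1, h2, h3, h4, List.contains_eq_mem]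

-- ===== VERDICT (by name: the statement is the Claim_ definition above) =====
theorem get_issues_spec : Claim_equal_get_issues := by
  intro password _
  unfold Spec_get_issues get_issues get_issues_alt
  simp only [pv_fold_flags, Bool.false_or]
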